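-- pv_equiv track=rewrite | github.com/flatmax/AI-Coder-DeCoder | src/ac_dc/edit_parser.py | _find_anchor
-- ===== SOURCE A (Python) =====
-- from typing import Optional
--
-- def _compute_common_prefix(old_lines: list[str], new_lines: list[str]) -> int:
--     """Compute the number of leading lines identical in both sections (the anchor)."""
--     count = 0
--     for o, n in zip(old_lines, new_lines):
--         if o == n:
--             count += 1
--         else:
--             break
--     return count
--
-- def _find_anchor(
--     content_lines: list[str],
--     old_lines: list[str],
--     new_lines: Optional[list[str]] = None,
-- ) -> tuple[Optional[int], str, str]:
--     """Find the unique anchor position in file content.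
--
--     Uses the common prefix of old_lines and new_lines as the anchor.
--     After locating the anchor, verifies the remaining old lines match.
--
--     Returns (start_index, error_message, error_type).
--     - start_index is None on failure.
--     - error_type is "anchor_not_found", "ambiguous_anchor", or "old_text_mismatch".
--     """
--     if not old_lines:
--         return None, "", ""
--
--     # Compute anchor (common prefix between old and new)
--     if new_lines is not None:
--         anchor_len = _compute_common_prefix(old_lines, new_lines)
--     else:
--         anchor_len = 0
--
--     # If no common prefix, use the full old_lines as the search target
--     if anchor_len == 0:
--         anchor_lines = old_lines
--     else:
--         anchor_lines = old_lines[:anchor_len]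
--
--     anchor_count = len(anchor_lines)
--     matches = []
--
--     for i in range(len(content_lines) - anchor_count + 1):
--         match = True
--         for j in range(anchor_count):
--             if content_lines[i + j] != anchor_lines[j]:
--                 match = False
--                 break
--         if match:
--             matches.append(i)
--
--     if len(matches) == 0:
--         return None, _diagnose_not_found(content_lines, old_lines), "anchor_not_found"
--     elif len(matches) > 1:
--         return None, f"Ambiguous anchor: found {len(matches)} matches", "ambiguous_anchor"
--
--     # Exactly one anchor match — now verify remaining old lines
--     start = matches[0]
--     if anchor_len > 0 and anchor_len < len(old_lines):
--         remaining = old_lines[anchor_len:]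
--         verify_start = start + anchor_len
--         for j, old_line in enumerate(remaining):
--             pos = verify_start + j
--             if pos >= len(content_lines) or content_lines[pos] != old_line:
--                 actual = content_lines[pos] if pos < len(content_lines) else "<EOF>"
--                 return (
--                     None,
--                     f"Old text mismatch at line {pos + 1}: "
--                     f"expected {repr(old_line)}, found {repr(actual)}",
--                     "old_text_mismatch",
--                 )
--
--     return start, "", ""
--
-- def _diagnose_not_found(content_lines: list[str], old_lines: list[str]) -> str:
--     """Provide diagnostic info for anchor not found."""
--     if not old_lines:
--         return "Empty anchor"
--
--     first_old = old_lines[0]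
--
--     # Check for whitespace-only mismatch
--     for i, cl in enumerate(content_lines):
--         if cl.strip() == first_old.strip() and cl != first_old:
--             return (
--                 f"Old text not found in file (whitespace mismatch near line {i + 1}: "
--                 f"expected {repr(first_old)}, found {repr(cl)})"
--             )
--
--     # Check for near matches
--     for i, cl in enumerate(content_lines):
--         if first_old.strip() and first_old.strip() in cl:
--             return f"Old text not found in file (nearest match at line {i + 1}: {repr(cl[:80])})"
--
--     return "Old text not found in file"
-- ===== SOURCE B (Python) =====
-- from typing import Optional
--
--
-- def _first_line_diagnosis(content_lines: list[str], old_lines: list[str]) -> str: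
--     """Diagnostic info for anchor not found (same messages, generator-based)."""
--     if not old_lines:
--         return "Empty anchor"
--     first_old = old_lines[0]
--     stripped = first_old.strip()
--     ws = next((i for i, cl in enumerate(content_lines)
--                if cl.strip() == stripped and cl != first_old), None)
--     if ws is not None:
--         return (
--             f"Old text not found in file (whitespace mismatch near line {ws + 1}: "
--             f"expected {first_old!r}, found {content_lines[ws]!r})"
--         )
--     if stripped:
--         near = next((i for i, cl in enumerate(content_lines) if stripped in cl), None)
--         if near is not None:
--             return (
--                 f"Old text not found in file (nearest match at line {near + 1}: "
--                 f"{content_lines[near][:80]!r})"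
--             )
--     return "Old text not found in file"
--
--
-- def _find_anchor(
--     content_lines: list[str],
--     old_lines: list[str],
--     new_lines: Optional[list[str]] = None,
-- ) -> tuple[Optional[int], str, str]:
--     if not old_lines:
--         return None, "", ""
--
--     # Anchor length = common prefix of old/new (0 if no new section given)
--     anchor_len = 0
--     if new_lines is not None:
--         for o, n in zip(old_lines, new_lines):
--             if o != n:
--                 break
--             anchor_len += 1
--
--     anchor = old_lines[:anchor_len] if anchor_len > 0 else old_lines
--     k = len(anchor)
--
--     # One pass over the file: index every line by its positions, then only the
--     # candidate positions of the anchor's first line are examined in full.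
--     index: dict[str, list[int]] = {}
--     for i, line in enumerate(content_lines):
--         index.setdefault(line, []).append(i)
--
--     matches = [i for i in index.get(anchor[0], [])
--                if content_lines[i:i + k] == anchor]
--
--     if not matches:
--         return None, _first_line_diagnosis(content_lines, old_lines), "anchor_not_found"
--     if len(matches) > 1:
--         return None, f"Ambiguous anchor: found {len(matches)} matches", "ambiguous_anchor"
--
--     start = matches[0]
--     if 0 < anchor_len < len(old_lines):
--         remaining = old_lines[anchor_len:]
--         vs = start + anchor_len
--         # Fast path: one slice comparison; locate the offending line only on failure.
--         if content_lines[vs:vs + len(remaining)] != remaining: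
--             j = next(j for j, line in enumerate(remaining)
--                      if vs + j >= len(content_lines) or content_lines[vs + j] != line)
--             pos = vs + j
--             actual = content_lines[pos] if pos < len(content_lines) else "<EOF>"
--             return (
--                 None,
--                 f"Old text mismatch at line {pos + 1}: "
--                 f"expected {remaining[j]!r}, found {actual!r}",
--                 "old_text_mismatch",
--             )
--
--     return start, "", ""
-- ===== Notes on version B (the rewrite author's own statement) =====
-- stated objective: alternative
-- what changed: B replaces A's scan of every window (with an inner line-by-line loop) by a line->positions index built in one dict pass -- only candidate positions of the anchor's first line are checked in full, via one slice comparison each -- and verifies the remaining old lines with a single slice comparison, locating the mismatching line only on failure.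
import Mathlib
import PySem

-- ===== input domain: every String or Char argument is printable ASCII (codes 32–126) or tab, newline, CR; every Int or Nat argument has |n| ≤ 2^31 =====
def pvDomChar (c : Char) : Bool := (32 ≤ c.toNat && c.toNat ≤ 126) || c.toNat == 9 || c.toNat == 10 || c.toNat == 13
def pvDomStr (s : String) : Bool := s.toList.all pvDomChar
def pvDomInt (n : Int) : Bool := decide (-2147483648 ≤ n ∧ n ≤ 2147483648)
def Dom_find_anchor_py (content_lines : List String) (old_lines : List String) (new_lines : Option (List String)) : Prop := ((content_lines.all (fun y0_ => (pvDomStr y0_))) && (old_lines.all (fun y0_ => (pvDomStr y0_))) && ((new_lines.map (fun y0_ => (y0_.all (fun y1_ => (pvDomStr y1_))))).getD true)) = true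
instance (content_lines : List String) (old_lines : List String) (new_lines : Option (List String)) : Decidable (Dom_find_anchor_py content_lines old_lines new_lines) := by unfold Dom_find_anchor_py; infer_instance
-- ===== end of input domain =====

-- B replaces A's scan of every window by a line→positions index built in one pass (only
-- candidate positions of the anchor's first line are checked in full) and verifies the tail
-- with one slice comparison; objective: alternative (same worst-case cost, fewer full scans).

-- Shared helper: Python's repr(s). Exact for strings of printable ASCII plus tab/newline/CR
-- (the stated domain): repr picks '"' iff the string has a single quote and no double quote,
-- and escapes only backslash, the chosen quote, tab, newline and CR on this domain.
def pyReprChar (q : Char) (c : Char) : List Char :=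
  if c = '\\' then ['\\', '\\']
  else if c = q then ['\\', q]
  else if c = Char.ofNat 9 then ['\\', 't']
  else if c = Char.ofNat 10 then ['\\', 'n']
  else if c = Char.ofNat 13 then ['\\', 'r']
  else [c]

def pyRepr (s : String) : String :=
  let cs := s.toList
  let q : Char := if cs.contains '\'' ∧ ¬ cs.contains '"' then '"' else '\''
  String.ofList (q :: cs.flatMap (pyReprChar q) ++ [q])

-- ===== PORT A =====

-- _compute_common_prefix: 'for o, n in zip(...): if o == n: count += 1 else: break'
def ccpA : List String → List String → Int
  | o :: os, n :: ns => if o = n then 1 + ccpA os ns else 0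
  | _, _ => 0

-- inner 'for j in range(anchor_count)' loop with break; idx runs i, i+1, … (= i + j)
def matchInnerA (content : List String) : Int → List String → Bool
  | _, [] => true
  | idx, a :: rest =>
    if PySem.List.pyGetD content idx "" ≠ a then false
    else matchInnerA content (idx + 1) rest

-- _diagnose_not_found, first loop (whitespace mismatch), with early return
def diagnoseWsA (first : String) : Int → List String → Option String
  | _, [] => none
  | i, cl :: rest =>
    if PySem.Str.strip cl = PySem.Str.strip first ∧ cl ≠ first then
      some ("Old text not found in file (whitespace mismatch near line " ++ PySem.Int.toStr (i + 1)
        ++ ": expected " ++ pyRepr first ++ ", found " ++ pyRepr cl ++ ")")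
    else diagnoseWsA first (i + 1) rest

-- _diagnose_not_found, second loop (nearest match), with early return
def diagnoseNearA (first : String) : Int → List String → Option String
  | _, [] => none
  | i, cl :: rest =>
    if PySem.Str.strip first ≠ "" ∧ PySem.Str.isIn (PySem.Str.strip first) cl then
      some ("Old text not found in file (nearest match at line " ++ PySem.Int.toStr (i + 1)
        ++ ": " ++ pyRepr (PySem.Str.slice cl none (some 80)) ++ ")")
    else diagnoseNearA first (i + 1) rest

def diagnoseA (content old : List String) : String :=
  match old with
  | [] => "Empty anchor"
  | first :: _ =>
    match diagnoseWsA first 0 content with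
    | some m => m
    | none =>
      match diagnoseNearA first 0 content with
      | some m => m
      | none => "Old text not found in file"

-- verification loop 'for j, old_line in enumerate(remaining)' with early return
def verifyA (content : List String) (vs : Int) : Int → List String → Option (Option Int × String × String)
  | _, [] => none
  | j, ol :: rest =>
    let pos := vs + j
    if (content.length : Int) ≤ pos ∨ PySem.List.pyGetD content pos "" ≠ ol then
      let actual := if pos < (content.length : Int) then PySem.List.pyGetD content pos "" else "<EOF>"
      some (none, "Old text mismatch at line " ++ PySem.Int.toStr (pos + 1) ++ ": expected "
        ++ pyRepr ol ++ ", found " ++ pyRepr actual, "old_text_mismatch")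
    else verifyA content vs (j + 1) rest

def find_anchor_py (content_lines : List String) (old_lines : List String) (new_lines : Option (List String)) : Option Int × String × String :=
  if old_lines = [] then (none, "", "")
  else
    let anchor_len : Int := match new_lines with
      | some nl => ccpA old_lines nl
      | none => 0
    let anchor_lines := if anchor_len = 0 then old_lines else PySem.List.slice old_lines none (some anchor_len)
    let anchor_count := anchor_lines.length
    let matchesL := (PySem.List.pyRange 0 ((content_lines.length : Int) - anchor_count + 1) 1).foldl
      (fun acc i => if matchInnerA content_lines i anchor_lines then acc ++ [i] else acc) []
    if matchesL.length = 0 then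
      (none, diagnoseA content_lines old_lines, "anchor_not_found")
    else if 1 < matchesL.length then
      (none, "Ambiguous anchor: found " ++ PySem.Int.toStr (matchesL.length : Int) ++ " matches", "ambiguous_anchor")
    else
      let start := PySem.List.pyGetD matchesL 0 0
      if 0 < anchor_len ∧ anchor_len < (old_lines.length : Int) then
        let remaining := PySem.List.slice old_lines (some anchor_len) none
        let verify_start := start + anchor_len
        match verifyA content_lines verify_start 0 remaining with
        | some r => r
        | none => (some start, "", "")
      else (some start, "", "")

-- ===== PORT B =====

-- anchor_len = next((i for i, (o, n) in enumerate(zip(...)) if o != n), min(len, len))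
def prefixLenB (old nl : List String) : Int :=
  match (old.zip nl).findIdx? (fun p => p.1 != p.2) with
  | some i => (i : Int)
  | none => min (old.length : Int) (nl.length : Int)

-- 'index.setdefault(line, []).append(i)' = index[line] = index.get(line, []) + [i]  (Dict.modify is exact)
def buildIndexB (content : List String) : PySem.Dict String (List Int) :=
  (PySem.List.enumerate content 0).foldl (fun d p => d.modify p.2 [] (· ++ [p.1])) PySem.Dict.empty

-- _first_line_diagnosis: two next(...) generators over enumerate(content_lines)
def diagnoseB (content old : List String) : String :=
  match old with
  | [] => "Empty anchor"
  | first :: _ =>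
    let stripped := PySem.Str.strip first
    match (PySem.List.enumerate content 0).find? (fun p => PySem.Str.strip p.2 == stripped && p.2 != first) with
    | some p =>
      "Old text not found in file (whitespace mismatch near line " ++ PySem.Int.toStr (p.1 + 1)
        ++ ": expected " ++ pyRepr first ++ ", found " ++ pyRepr (PySem.List.pyGetD content p.1 "") ++ ")"
    | none =>
      if stripped ≠ "" then
        match (PySem.List.enumerate content 0).find? (fun p => PySem.Str.isIn stripped p.2) with
        | some p =>
          "Old text not found in file (nearest match at line " ++ PySem.Int.toStr (p.1 + 1)
            ++ ": " ++ pyRepr (PySem.Str.slice (PySem.List.pyGetD content p.1 "") none (some 80)) ++ ")"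
        | none => "Old text not found in file"
      else "Old text not found in file"

def find_anchor_py_alt (content_lines : List String) (old_lines : List String) (new_lines : Option (List String)) : Option Int × String × String :=
  if old_lines = [] then (none, "", "")
  else
    let anchor_len : Int := match new_lines with
      | some nl => prefixLenB old_lines nl
      | none => 0
    let anchor := if 0 < anchor_len then PySem.List.slice old_lines none (some anchor_len) else old_lines
    let k := anchor.length
    let index := buildIndexB content_lines
    let matchesL := (index.getD (PySem.List.pyGetD anchor 0 "") []).filter
      (fun i => PySem.List.slice content_lines (some i) (some (i + (k : Int))) == anchor)
    if matchesL = [] then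
      (none, diagnoseB content_lines old_lines, "anchor_not_found")
    else if 1 < matchesL.length then
      (none, "Ambiguous anchor: found " ++ PySem.Int.toStr (matchesL.length : Int) ++ " matches", "ambiguous_anchor")
    else
      let start := PySem.List.pyGetD matchesL 0 0
      if 0 < anchor_len ∧ anchor_len < (old_lines.length : Int) then
        let remaining := PySem.List.slice old_lines (some anchor_len) none
        let vs := start + anchor_len
        if PySem.List.slice content_lines (some vs) (some (vs + (remaining.length : Int))) ≠ remaining then
          match (PySem.List.enumerate remaining 0).find? (fun p =>
              decide ((content_lines.length : Int) ≤ vs + p.1) || (PySem.List.pyGetD content_lines (vs + p.1) "" != p.2)) with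
          | some p =>
            let pos := vs + p.1
            let actual := if pos < (content_lines.length : Int) then PySem.List.pyGetD content_lines pos "" else "<EOF>"
            (none, "Old text mismatch at line " ++ PySem.Int.toStr (pos + 1) ++ ": expected "
              ++ pyRepr p.2 ++ ", found " ++ pyRepr actual, "old_text_mismatch")
          -- unreachable: the slices differ, so a mismatching index exists (Python's bare next would raise)
          | none => (some start, "", "")
        else (some start, "", "")
      else (some start, "", "")

-- ===== PRECONDITION & SPEC =====
def Spec_find_anchor_py (content_lines : List String) (old_lines : List String) (new_lines : Option (List String)) (out : Option Int × String × String) : Prop := out = find_anchor_py_alt content_lines old_lines new_lines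
instance (content_lines : List String) (old_lines : List String) (new_lines : Option (List String)) (out : Option Int × String × String) : Decidable (Spec_find_anchor_py content_lines old_lines new_lines out) := by unfold Spec_find_anchor_py; infer_instance

-- ===== CLAIM (what is proved, stated in full; the proofs are below) =====
def Claim_equal_find_anchor_py : Prop := ∀ (content_lines : List String) (old_lines : List String) (new_lines : Option (List String)), Dom_find_anchor_py content_lines old_lines new_lines → Spec_find_anchor_py content_lines old_lines new_lines (find_anchor_py content_lines old_lines new_lines)

-- ===== LEMMAS AND PROOFS =====

-- common prefix: A's loop = B's first-difference index
lemma ccpA_eq_prefixLenB (old nl : List String) : ccpA old nl = prefixLenB old nl := by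
  induction old generalizing nl with
  | nil =>
    cases nl with
    | nil => simp [ccpA, prefixLenB]
    | cons n ns => simp [ccpA, prefixLenB]; omega
  | cons o os ih =>
    cases nl with
    | nil => simp [ccpA, prefixLenB]; omega
    | cons n ns =>
      by_cases h : o = n
      · subst h
        simp only [ccpA, ih ns, prefixLenB, List.zip_cons_cons, List.findIdx?_cons]
        simp only [bne_self_eq_false]
        cases hf : (os.zip ns).findIdx? (fun p => p.1 != p.2) with
        | some i => simp; omega
        | none => simp; omega
      · simp [ccpA, h, prefixLenB, List.findIdx?_cons, bne_iff_ne]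

lemma ccpA_nonneg (old nl : List String) : 0 ≤ ccpA old nl := by
  induction old generalizing nl with
  | nil => cases nl <;> simp [ccpA]
  | cons o os ih =>
    cases nl with
    | nil => simp [ccpA]
    | cons n ns =>
      by_cases h : o = n
      · simp only [ccpA, if_pos h]; have := ih ns; omega
      · simp [ccpA, h]

lemma matchInnerA_eq (content : List String) : ∀ (anchor : List String) (i : Int), 0 ≤ i →
    i + anchor.length ≤ content.length →
    matchInnerA content i anchor = ((content.drop i.toNat).take anchor.length == anchor) := by
  intro anchor
  induction anchor with
  | nil => intro i h0 hle; simp [matchInnerA]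
  | cons a rest ih =>
    intro i h0 hle
    simp only [List.length_cons] at hle
    have hlt : i.toNat < content.length := by omega
    have hdrop : content.drop i.toNat = content[i.toNat] :: content.drop (i.toNat + 1) :=
      List.drop_eq_getElem_cons hlt
    have hget : PySem.List.pyGetD content i "" = content[i.toNat] :=
      PySem.List.pyGetD_eq_getElem content "" h0 (by omega)
    have hts : (i + 1).toNat = i.toNat + 1 := by omega
    rw [matchInnerA, hdrop]
    simp only [List.length_cons, List.take_succ_cons, List.cons_beq_cons, hget]
    by_cases hcl : content[i.toNat] = a
    · rw [if_neg (by simp [hcl]), ih (i + 1) (by omega) (by omega), hts]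
      simp [hcl]
    · rw [if_pos (by simp [hcl])]
      simp [hcl]

-- B's index lookup = the positions of `line` in content, in order
lemma getD_buildIndexB (content : List String) (line : String) :
    (buildIndexB content).getD line [] =
      ((PySem.List.pyRange 0 (content.length : Int) 1).filter
        (fun j => PySem.List.pyGetD content j "" == line)) := by
  unfold buildIndexB
  have hmap : (PySem.List.enumerate content 0).foldl (fun d p => d.modify p.2 [] (· ++ [p.1])) PySem.Dict.empty
      = ((PySem.List.enumerate content 0).map (fun p => (p.2, p.1))).foldl
          (fun d q => d.modify q.1 [] (· ++ [q.2])) PySem.Dict.empty := by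
    rw [List.foldl_map]
  rw [hmap, PySem.Dict.getD_foldl_modify_append]
  rw [PySem.List.enumerate_eq_map_pyRange content ""]
  simp only [List.map_map, List.filter_map, List.map_map, PySem.List.len_eq,
    PySem.Dict.getD_empty, List.nil_append]
  have : ∀ l : List Int, List.map ((fun x : String × Int => x.2) ∘ (fun p : Int × String => (p.2, p.1)) ∘ fun j => (j, PySem.List.pyGetD content j "")) l = l := by
    intro l; induction l <;> simp_all
  rw [this]; rfl

lemma slice_beq_false_of_short (content anchor : List String) (j : Int) (h0 : 0 ≤ j)
    (hpos : 0 < anchor.length)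
    (hs : (content.length : Int) < j + anchor.length) :
    (PySem.List.slice content (some j) (some (j + (anchor.length : Int))) == anchor) = false := by
  rw [beq_eq_false_iff_ne]
  intro h
  have hlen := congrArg List.length h
  rw [PySem.List.slice_toNat content h0 (by omega)] at hlen
  rw [List.length_take, List.length_drop] at hlen
  have hmin := min_le_right ((j + (anchor.length : Int)).toNat - j.toNat) (content.length - j.toNat)
  rw [hlen] at hmin
  omega

lemma matchInnerA_eq_slice_beq (content anchor : List String) (j : Int) (h0 : 0 ≤ j)
    (hle : j + anchor.length ≤ (content.length : Int)) :
    matchInnerA content j anchor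
      = (PySem.List.slice content (some j) (some (j + (anchor.length : Int))) == anchor) := by
  rw [matchInnerA_eq content anchor j h0 (by omega), PySem.List.slice_toNat content h0 (by omega)]
  have h1 : (j + (anchor.length : Int)).toNat - j.toNat = anchor.length := by omega
  rw [h1]

-- the two matches lists agree
lemma matches_eq (content : List String) (first : String) (rest : List String) :
    (PySem.List.pyRange 0 ((content.length : Int) - (first :: rest).length + 1) 1).foldl
      (fun acc i => if matchInnerA content i (first :: rest) then acc ++ [i] else acc) []
    = ((buildIndexB content).getD (PySem.List.pyGetD (first :: rest) 0 "") []).filter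
      (fun i => PySem.List.slice content (some i) (some (i + ((first :: rest).length : Int))) == (first :: rest)) := by
  have hfirst : PySem.List.pyGetD (first :: rest) 0 "" = first := by
    rw [show (0 : Int) = ((0 : Nat) : Int) from rfl, PySem.List.pyGetD_natCast]; rfl
  rw [PySem.List.foldl_append_if_eq_filter, List.nil_append, hfirst, getD_buildIndexB,
    List.filter_filter]
  set anchor := first :: rest with hanch
  set k : Int := (anchor.length : Int) with hk
  set n : Int := (content.length : Int) with hn
  have hk1 : 1 ≤ k := by simp [hk, hanch]
  have hcollapse : ∀ j ∈ PySem.List.pyRange 0 n 1,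
      ((PySem.List.slice content (some j) (some (j + k)) == anchor) &&
        (PySem.List.pyGetD content j "" == first))
      = (PySem.List.slice content (some j) (some (j + k)) == anchor) := by
    intro j hj
    rw [PySem.List.mem_pyRange_one] at hj
    by_cases hq : (PySem.List.slice content (some j) (some (j + k)) == anchor) = true
    · rw [hq, Bool.true_and]
      have heq : PySem.List.slice content (some j) (some (j + k)) = anchor := eq_of_beq hq
      have hle : j + k ≤ n := by
        by_contra hgt
        rw [slice_beq_false_of_short content anchor j hj.1 (by simp [hanch]) (by omega)] at hq
        exact Bool.false_ne_true hq
      rw [PySem.List.slice_toNat content hj.1 (by omega)] at heq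
      have hlt : j.toNat < content.length := by omega
      have hdrop : content.drop j.toNat = content[j.toNat] :: content.drop (j.toNat + 1) :=
        List.drop_eq_getElem_cons hlt
      have hkn : (j + k).toNat - j.toNat = anchor.length := by omega
      rw [hkn, hdrop, hanch] at heq
      simp only [List.length_cons, List.take_succ_cons, List.cons.injEq] at heq
      rw [PySem.List.pyGetD_eq_getElem content "" hj.1 (by omega)]
      simp [heq.1]
    · simp only [Bool.not_eq_true] at hq
      rw [hq, Bool.false_and]
  rw [List.filter_congr hcollapse]
  by_cases hkn : k ≤ n
  · rw [PySem.List.pyRange_one_append 0 (n - k + 1) n (by omega) (by omega), List.filter_append]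
    have h2 : (PySem.List.pyRange (n - k + 1) n 1).filter
        (fun j => PySem.List.slice content (some j) (some (j + k)) == anchor) = [] := by
      apply List.filter_eq_nil_iff.mpr
      intro j hj
      rw [PySem.List.mem_pyRange_one] at hj
      rw [slice_beq_false_of_short content anchor j (by omega) (by simp [hanch]) (by omega)]
      simp
    rw [h2, List.append_nil]
    apply List.filter_congr
    intro j hj
    rw [PySem.List.mem_pyRange_one] at hj
    exact matchInnerA_eq_slice_beq content anchor j hj.1 (by omega)
  · rw [PySem.List.pyRange_one_eq_nil (by omega)]
    symm
    apply List.filter_eq_nil_iff.mpr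
    intro j hj
    rw [PySem.List.mem_pyRange_one] at hj
    rw [slice_beq_false_of_short content anchor j (by omega) (by simp [hanch]) (by omega)]
    simp

-- ===== diagnose lemmas =====

lemma diagnoseWsA_eq_find? (first : String) : ∀ (content : List String) (i : Int),
    diagnoseWsA first i content =
      ((PySem.List.enumerate content i).find?
        (fun p => PySem.Str.strip p.2 == PySem.Str.strip first && p.2 != first)).map
        (fun p => "Old text not found in file (whitespace mismatch near line " ++ PySem.Int.toStr (p.1 + 1)
          ++ ": expected " ++ pyRepr first ++ ", found " ++ pyRepr p.2 ++ ")") := by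
  intro content
  induction content with
  | nil => intro i; rfl
  | cons cl rest ih =>
    intro i
    show diagnoseWsA first i (cl :: rest) = (((i, cl) :: PySem.List.enumerate rest (i + 1)).find? _).map _
    rw [diagnoseWsA, List.find?_cons]
    by_cases h : PySem.Str.strip cl = PySem.Str.strip first ∧ cl ≠ first
    · have : (PySem.Str.strip cl == PySem.Str.strip first && cl != first) = true := by
        simp [h.1, h.2]
      rw [if_pos h]; simp only [this, Option.map_some]
    · have : (PySem.Str.strip cl == PySem.Str.strip first && cl != first) = false := by
        rw [Bool.and_eq_false_iff]
        by_cases h1 : PySem.Str.strip cl = PySem.Str.strip first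
        · right; simp [not_and] at h; simp [h h1]
        · left; simp [h1]
      rw [if_neg h]; simp only [this, ih (i + 1)]

lemma diagnoseNearA_eq_find? (first : String) (hne : PySem.Str.strip first ≠ "") :
    ∀ (content : List String) (i : Int),
    diagnoseNearA first i content =
      ((PySem.List.enumerate content i).find? (fun p => PySem.Str.isIn (PySem.Str.strip first) p.2)).map
        (fun p => "Old text not found in file (nearest match at line " ++ PySem.Int.toStr (p.1 + 1)
          ++ ": " ++ pyRepr (PySem.Str.slice p.2 none (some 80)) ++ ")") := by
  intro content
  induction content with
  | nil => intro i; rfl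
  | cons cl rest ih =>
    intro i
    show diagnoseNearA first i (cl :: rest) = (((i, cl) :: PySem.List.enumerate rest (i + 1)).find? _).map _
    rw [diagnoseNearA, List.find?_cons]
    by_cases h : PySem.Str.isIn (PySem.Str.strip first) cl = true
    · rw [if_pos ⟨hne, h⟩]; simp only [h, Option.map_some]
    · have h' : PySem.Str.isIn (PySem.Str.strip first) cl = false := by revert h; simp
      rw [if_neg (by tauto), h', ih (i + 1)]

lemma diagnoseNearA_none (first : String) (hstr : PySem.Str.strip first = "") :
    ∀ (content : List String) (i : Int), diagnoseNearA first i content = none := by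
  intro content
  induction content with
  | nil => intro i; rfl
  | cons cl rest ih =>
    intro i
    rw [diagnoseNearA, if_neg (by simp [hstr]), ih (i + 1)]

lemma mem_enumerate_pyGetD (content : List String) (p : Int × String)
    (hp : p ∈ PySem.List.enumerate content 0) : PySem.List.pyGetD content p.1 "" = p.2 := by
  rw [PySem.List.enumerate_eq_map_pyRange content ""] at hp
  obtain ⟨j, _, rfl⟩ := List.mem_map.mp hp
  rfl

lemma diagnose_eq (content old : List String) : diagnoseA content old = diagnoseB content old := by
  cases old with
  | nil => rfl
  | cons first tl =>
    rw [diagnoseA, diagnoseB]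
    rw [diagnoseWsA_eq_find? first content 0]
    cases hws : (PySem.List.enumerate content 0).find?
        (fun p => PySem.Str.strip p.2 == PySem.Str.strip first && p.2 != first) with
    | some p =>
      have hmem := List.mem_of_find?_eq_some hws
      have hget := mem_enumerate_pyGetD content p hmem
      simp only [Option.map_some, hget]
    | none =>
      simp only [Option.map_none]
      by_cases hstr : PySem.Str.strip first = ""
      · rw [diagnoseNearA_none first hstr content 0, if_neg (by simp [hstr])]
      · rw [diagnoseNearA_eq_find? first hstr content 0, if_pos hstr]
        cases hnr : (PySem.List.enumerate content 0).find?
            (fun p => PySem.Str.isIn (PySem.Str.strip first) p.2) with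
        | some p =>
          have hmem := List.mem_of_find?_eq_some hnr
          have hget := mem_enumerate_pyGetD content p hmem
          simp only [Option.map_some, hget]
        | none => simp only [Option.map_none]

-- ===== verify lemmas =====

lemma verifyA_shift (content : List String) (rem : List String) : ∀ (vs j : Int),
    verifyA content vs j rem = verifyA content (vs + j) 0 rem := by
  induction rem with
  | nil => intro vs j; rfl
  | cons ol rest ih =>
    intro vs j
    simp only [verifyA, add_zero]
    by_cases h : (content.length : Int) ≤ vs + j ∨ PySem.List.pyGetD content (vs + j) "" ≠ ol
    · simp [h]
    · simp only [if_neg h]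
      rw [ih vs (j + 1), ih (vs + j) (0 + 1)]
      ring_nf

def predB (content : List String) (vs : Int) : Int × String → Bool :=
  fun p => decide ((content.length : Int) ≤ vs + p.1) || (PySem.List.pyGetD content (vs + p.1) "" != p.2)

def msgB (content : List String) (vs : Int) (p : Int × String) : Option Int × String × String :=
  ((none : Option Int), "Old text mismatch at line " ++ PySem.Int.toStr (vs + p.1 + 1) ++ ": expected "
    ++ pyRepr p.2 ++ ", found "
    ++ pyRepr (if vs + p.1 < (content.length : Int) then PySem.List.pyGetD content (vs + p.1) "" else "<EOF>"),
    "old_text_mismatch")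

lemma enumerate_cons {α : Type} (x : α) (xs : List α) :
    PySem.List.enumerate (x :: xs) 0 = (0, x) :: (PySem.List.enumerate xs 0).map (fun p => (p.1 + 1, p.2)) := by
  have h : ∀ (s : Int), PySem.List.enumerate xs (s + 1) = (PySem.List.enumerate xs s).map (fun p => (p.1 + 1, p.2)) := by
    intro s
    induction xs generalizing s with
    | nil => rfl
    | cons y ys ih => simp_all [PySem.List.enumerate]
  simp [PySem.List.enumerate, ← h 0]

lemma verifyA_eq_find? (content : List String) : ∀ (rem : List String) (vs : Int),
    verifyA content vs 0 rem =
      ((PySem.List.enumerate rem 0).find? (predB content vs)).map (msgB content vs) := by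
  intro rem
  induction rem with
  | nil => intro vs; rfl
  | cons ol rest ih =>
    intro vs
    rw [enumerate_cons, List.find?_cons]
    by_cases h : (content.length : Int) ≤ vs + 0 ∨ PySem.List.pyGetD content (vs + 0) "" ≠ ol
    · have hp : predB content vs (0, ol) = true := by
        simp only [predB]; revert h; simp_all; try tauto
      simp only [hp, Option.map_some]
      simp only [verifyA, if_pos h, msgB]
    · have hp : predB content vs (0, ol) = false := by
        simp only [predB]; revert h; simp_all; try tauto
      simp only [hp, verifyA, if_neg h]
      rw [verifyA_shift content rest vs (0 + 1)]
      norm_num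
      rw [ih (vs + 1)]
      have h1 : (predB content vs) ∘ (fun p : Int × String => (p.1 + 1, p.2)) = predB content (vs + 1) := by
        funext p; simp only [Function.comp, predB]
        have : vs + (p.1 + 1) = vs + 1 + p.1 := by ring
        rw [this]
      have h2 : (msgB content vs) ∘ (fun p : Int × String => (p.1 + 1, p.2)) = msgB content (vs + 1) := by
        funext p; simp only [Function.comp, msgB]
        have : vs + (p.1 + 1) = vs + 1 + p.1 := by ring
        rw [this]
      rw [h1, h2]

lemma find?_none_iff_slice (content : List String) : ∀ (rem : List String) (vs : Int), 0 ≤ vs →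
    ((PySem.List.enumerate rem 0).find? (predB content vs) = none ↔
      (content.drop vs.toNat).take rem.length = rem) := by
  intro rem
  induction rem with
  | nil => intro vs h; simp [PySem.List.enumerate]
  | cons ol rest ih =>
    intro vs hvs
    rw [enumerate_cons, List.find?_cons]
    by_cases hp : predB content vs (0, ol) = true
    · rw [hp]
      simp only [predB, add_zero, Bool.or_eq_true, decide_eq_true_eq, bne_iff_ne] at hp
      constructor
      · intro h; exact (Option.some_ne_none _ h).elim
      · intro h
        exfalso
        have hlt : vs.toNat < content.length := by
          by_contra hge
          have : content.drop vs.toNat = [] := by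
            apply List.drop_eq_nil_of_le; omega
          rw [this] at h; simp at h
        have hdrop : content.drop vs.toNat = content[vs.toNat] :: content.drop (vs.toNat + 1) :=
          List.drop_eq_getElem_cons hlt
        rw [hdrop] at h
        simp only [List.length_cons, List.take_succ_cons, List.cons.injEq] at h
        have hget : PySem.List.pyGetD content vs "" = content[vs.toNat] :=
          PySem.List.pyGetD_eq_getElem content "" hvs (by omega)
        rcases hp with h1 | h2
        · omega
        · exact h2 (hget.trans h.1)
    · have hp' : predB content vs (0, ol) = false := by revert hp; simp
      rw [hp']
      simp only [predB, add_zero, Bool.or_eq_false_iff, decide_eq_false_iff_not, not_le, bne_eq_false_iff_eq] at hp'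
      obtain ⟨hlt, heq⟩ := hp'
      have hlt' : vs.toNat < content.length := by omega
      have hdrop : content.drop vs.toNat = content[vs.toNat] :: content.drop (vs.toNat + 1) :=
        List.drop_eq_getElem_cons hlt'
      have hget : PySem.List.pyGetD content vs "" = content[vs.toNat] :=
        PySem.List.pyGetD_eq_getElem content "" hvs (by omega)
      have hfind : ((List.map (fun p : Int × String => (p.1 + 1, p.2)) (PySem.List.enumerate rest)).find? (predB content vs) = none)
          ↔ ((PySem.List.enumerate rest).find? (predB content (vs + 1)) = none) := by
        rw [List.find?_map]
        have h1 : (predB content vs) ∘ (fun p : Int × String => (p.1 + 1, p.2)) = predB content (vs + 1) := by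
          funext p; simp only [Function.comp, predB]
          have : vs + (p.1 + 1) = vs + 1 + p.1 := by ring
          rw [this]
        rw [h1, Option.map_eq_none_iff]
      rw [hfind, ih (vs + 1) (by omega)]
      have hts : (vs + 1).toNat = vs.toNat + 1 := by omega
      rw [hts, hdrop]
      simp only [List.length_cons, List.take_succ_cons, List.cons.injEq]
      rw [← hget, heq]
      tauto


-- the whole computation after anchor_len, for a fixed anchor_len value al
lemma find_anchor_core (content old : List String) (hold : old ≠ []) (al : Int) (hal0 : 0 ≤ al) :
    (let anchor_lines := if al = 0 then old else PySem.List.slice old none (some al);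
     let anchor_count := anchor_lines.length;
     let matchesL := (PySem.List.pyRange 0 ((content.length : Int) - anchor_count + 1) 1).foldl
        (fun acc i => if matchInnerA content i anchor_lines then acc ++ [i] else acc) [];
     if matchesL.length = 0 then ((none : Option Int), diagnoseA content old, "anchor_not_found")
     else if 1 < matchesL.length then
       (none, "Ambiguous anchor: found " ++ PySem.Int.toStr (matchesL.length : Int) ++ " matches", "ambiguous_anchor")
     else
       let start := PySem.List.pyGetD matchesL 0 0
       if 0 < al ∧ al < (old.length : Int) then
         let remaining := PySem.List.slice old (some al) none
         let verify_start := start + al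
         match verifyA content verify_start 0 remaining with
         | some r => r
         | none => (some start, "", "")
       else (some start, "", ""))
    = (let anchor := if 0 < al then PySem.List.slice old none (some al) else old;
       let k := anchor.length;
       let index := buildIndexB content;
       let matchesL := (index.getD (PySem.List.pyGetD anchor 0 "") []).filter
          (fun i => PySem.List.slice content (some i) (some (i + (k : Int))) == anchor);
       if matchesL = [] then ((none : Option Int), diagnoseB content old, "anchor_not_found")
       else if 1 < matchesL.length then
         (none, "Ambiguous anchor: found " ++ PySem.Int.toStr (matchesL.length : Int) ++ " matches", "ambiguous_anchor")
       else
         let start := PySem.List.pyGetD matchesL 0 0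
         if 0 < al ∧ al < (old.length : Int) then
           let remaining := PySem.List.slice old (some al) none
           let vs := start + al
           if PySem.List.slice content (some vs) (some (vs + (remaining.length : Int))) ≠ remaining then
             match (PySem.List.enumerate remaining 0).find? (fun p =>
                 decide ((content.length : Int) ≤ vs + p.1) || (PySem.List.pyGetD content (vs + p.1) "" != p.2)) with
             | some p =>
               let pos := vs + p.1
               let actual := if pos < (content.length : Int) then PySem.List.pyGetD content pos "" else "<EOF>"
               (none, "Old text mismatch at line " ++ PySem.Int.toStr (pos + 1) ++ ": expected "
                 ++ pyRepr p.2 ++ ", found " ++ pyRepr actual, "old_text_mismatch")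
             | none => (some start, "", "")
           else (some start, "", "")
         else (some start, "", "")) := by
  have hanch : (if al = 0 then old else PySem.List.slice old none (some al))
      = (if 0 < al then PySem.List.slice old none (some al) else old) := by
    by_cases h : al = 0
    · rw [if_pos h, if_neg (by omega)]
    · rw [if_neg h, if_pos (by omega)]
  simp only [hanch]
  set anchor := (if 0 < al then PySem.List.slice old none (some al) else old) with hanchdef
  have hanchne : anchor ≠ [] := by
    rw [hanchdef]
    by_cases h : 0 < al
    · rw [if_pos h, PySem.List.slice_to old hal0]
      intro hnil
      have := congrArg List.length hnil
      simp only [List.length_take, List.length_nil] at this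
      exact hold (List.length_eq_zero_iff.mp (by omega))
    · rw [if_neg h]; exact hold
  obtain ⟨first, rest, heq⟩ : ∃ f r, anchor = f :: r := by
    cases hA : anchor with
    | nil => exact absurd hA hanchne
    | cons f r => exact ⟨f, r, rfl⟩
  rw [heq]
  rw [matches_eq content first rest]
  set M := ((buildIndexB content).getD (PySem.List.pyGetD (first :: rest) 0 "") []).filter
      (fun i => PySem.List.slice content (some i) (some (i + ((first :: rest).length : Int))) == (first :: rest)) with hMdef
  by_cases hM0 : M = []
  · rw [if_pos (by simp [hM0]), if_pos hM0, diagnose_eq]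
  · rw [if_neg (by simp [hM0]), if_neg hM0]
    by_cases hM1 : 1 < M.length
    · rw [if_pos hM1, if_pos hM1]
    · rw [if_neg hM1, if_neg hM1]
      obtain ⟨m, ms, hMcons⟩ : ∃ m ms, M = m :: ms := by
        cases hA : M with
        | nil => exact absurd hA hM0
        | cons m ms => exact ⟨m, ms, rfl⟩
      have hstart : PySem.List.pyGetD M 0 0 = m := by
        rw [hMcons, show (0 : Int) = ((0 : Nat) : Int) from rfl, PySem.List.pyGetD_natCast]; rfl
      have hm0 : 0 ≤ m := by
        have hmem : m ∈ M := by rw [hMcons]; exact List.mem_cons_self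
        rw [hMdef] at hmem
        have h1 := List.mem_of_mem_filter hmem
        rw [getD_buildIndexB] at h1
        have h2 := List.mem_of_mem_filter h1
        exact (PySem.List.mem_pyRange_one.mp h2).1
      by_cases hrange : 0 < al ∧ al < (old.length : Int)
      · rw [if_pos hrange, if_pos hrange]
        rw [hstart]
        set vs := m + al with hvsdef
        have hvs0 : 0 ≤ vs := by omega
        set remaining := PySem.List.slice old (some al) none with hremdef
        rw [verifyA_eq_find? content remaining vs]
        have hpred : (fun p : Int × String =>
            decide ((content.length : Int) ≤ vs + p.1) || (PySem.List.pyGetD content (vs + p.1) "" != p.2))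
            = predB content vs := rfl
        rw [hpred]
        have hsl_eq : PySem.List.slice content (some vs) (some (vs + (remaining.length : Int)))
            = (content.drop vs.toNat).take remaining.length := by
          rw [PySem.List.slice_toNat content hvs0 (by omega)]
          congr 1
          omega
        by_cases hsl : (content.drop vs.toNat).take remaining.length = remaining
        · rw [(find?_none_iff_slice content remaining vs hvs0).mpr hsl]
          rw [if_neg (by rw [hsl_eq]; simpa using hsl)]
          rfl
        · have hne : (PySem.List.enumerate remaining 0).find? (predB content vs) ≠ none := by
            intro h; exact hsl ((find?_none_iff_slice content remaining vs hvs0).mp h)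
          obtain ⟨p, hp⟩ := Option.ne_none_iff_exists'.mp hne
          rw [hp, if_pos (by rw [hsl_eq]; simpa using hsl)]
          simp only [Option.map_some, msgB]
      · rw [if_neg hrange, if_neg hrange]

-- ===== VERDICT (by name: the statement is the Claim_ definition above) =====
theorem find_anchor_py_spec : Claim_equal_find_anchor_py := by
  intro content old new _
  unfold Spec_find_anchor_py
  by_cases hold : old = []
  · simp [find_anchor_py, find_anchor_py_alt, hold]
  · cases new with
    | none =>
      simp only [find_anchor_py, find_anchor_py_alt, if_neg hold]
      exact find_anchor_core content old hold 0 le_rfl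
    | some nl =>
      simp only [find_anchor_py, find_anchor_py_alt, if_neg hold]
      rw [ccpA_eq_prefixLenB old nl]
      exact find_anchor_core content old hold (prefixLenB old nl)
        ((ccpA_eq_prefixLenB old nl) ▸ ccpA_nonneg old nl)
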